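-- pv_equiv track=rewrite | github.com/Matheeus-Pereira/topicos-especiais | prova01/questao-04.py | processar
-- ===== SOURCE A (Python) =====
-- def processar(idades):
--     classificao = {
--         "criança":[], "adolescente":[], "adulto":[], "idoso":[]
--     }
--     for pessoa in idades:
--         if pessoa <= 12:
--             classificao["criança"].append(pessoa)
--         elif 13  <=pessoa<=17:
--            classificao["adolescente"].append(pessoa)
--         elif 17<pessoa<=64:
--             classificao["adulto"].append(pessoa)
--         else:
--             classificao["idoso"].append(pessoa)
--
--     return classificao
-- ===== SOURCE B (Python) =====
-- def processar(idades):
--     return {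
--         "crian\u00e7a": [p for p in idades if p <= 12],
--         "adolescente": [p for p in idades if 13 <= p <= 17],
--         "adulto": [p for p in idades if 18 <= p <= 64],
--         "idoso": [p for p in idades if p >= 65],
--     }
-- ===== Notes on version B (the rewrite author's own statement) =====
-- stated objective: alternative
-- what changed: Replaces the single branching loop mutating a dict with four independent filter passes, one per category, each with an explicit closed-interval predicate.
import Mathlib
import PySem

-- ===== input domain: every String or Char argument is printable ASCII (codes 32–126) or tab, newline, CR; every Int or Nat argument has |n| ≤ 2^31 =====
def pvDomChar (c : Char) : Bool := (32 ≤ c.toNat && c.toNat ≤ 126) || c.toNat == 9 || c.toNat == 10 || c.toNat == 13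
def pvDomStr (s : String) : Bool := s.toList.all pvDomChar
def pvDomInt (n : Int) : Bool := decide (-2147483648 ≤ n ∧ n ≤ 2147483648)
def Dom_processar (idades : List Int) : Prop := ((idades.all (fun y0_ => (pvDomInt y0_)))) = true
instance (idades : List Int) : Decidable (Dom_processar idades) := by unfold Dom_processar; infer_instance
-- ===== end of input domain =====

-- B replaces A's single branching loop over a mutated dict with four independent filter passes (alternative decomposition, same cost).

-- ===== PORT A =====
def processar (idades : List Int) : List (String × List Int) :=
  let classificao : PySem.Dict String (List Int) :=
    PySem.Dict.ofList [("criança", []), ("adolescente", []), ("adulto", []), ("idoso", [])]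
  let classificao := idades.foldl (fun d pessoa =>
    if pessoa ≤ 12 then
      d.modify "criança" [] (· ++ [pessoa])
    else if 13 ≤ pessoa ∧ pessoa ≤ 17 then
      d.modify "adolescente" [] (· ++ [pessoa])
    else if 17 < pessoa ∧ pessoa ≤ 64 then
      d.modify "adulto" [] (· ++ [pessoa])
    else
      d.modify "idoso" [] (· ++ [pessoa])) classificao
  classificao.items

-- ===== PORT B =====
def processar_alt (idades : List Int) : List (String × List Int) :=
  [("criança", idades.filter (fun p => decide (p ≤ 12))),
   ("adolescente", idades.filter (fun p => decide (13 ≤ p ∧ p ≤ 17))),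
   ("adulto", idades.filter (fun p => decide (18 ≤ p ∧ p ≤ 64))),
   ("idoso", idades.filter (fun p => decide (65 ≤ p)))]

-- ===== PRECONDITION & SPEC =====
def Spec_processar (idades : List Int) (out : List (String × List Int)) : Prop := out = processar_alt idades
instance (idades : List Int) (out : List (String × List Int)) : Decidable (Spec_processar idades out) := by unfold Spec_processar; infer_instance

-- ===== CLAIM (what is proved, stated in full; the proofs are below) =====
def Claim_equal_processar : Prop := ∀ (idades : List Int), Dom_processar idades → Spec_processar idades (processar idades)

-- ===== LEMMAS AND PROOFS =====

-- Invariant of A's loop: from an arbitrary 4-entry dict, the loop appends A's four branch filters.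
theorem processar_loop_inv (xs : List Int) (c a ad i : List Int) :
    xs.foldl (fun d pessoa =>
      if pessoa ≤ 12 then
        d.modify "criança" [] (· ++ [pessoa])
      else if 13 ≤ pessoa ∧ pessoa ≤ 17 then
        d.modify "adolescente" [] (· ++ [pessoa])
      else if 17 < pessoa ∧ pessoa ≤ 64 then
        d.modify "adulto" [] (· ++ [pessoa])
      else
        d.modify "idoso" [] (· ++ [pessoa]))
      (PySem.Dict.mk [("criança", c), ("adolescente", a), ("adulto", ad), ("idoso", i)])
    = PySem.Dict.mk [("criança", c ++ xs.filter (fun p => decide (p ≤ 12))),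
        ("adolescente", a ++ xs.filter (fun p => decide (13 ≤ p ∧ p ≤ 17))),
        ("adulto", ad ++ xs.filter (fun p => decide (17 < p ∧ p ≤ 64))),
        ("idoso", i ++ xs.filter (fun p => decide (¬ (p ≤ 12) ∧ ¬ (13 ≤ p ∧ p ≤ 17) ∧ ¬ (17 < p ∧ p ≤ 64))))] := by
  induction xs generalizing c a ad i with
  | nil => simp
  | cons x xs ih =>
    simp only [List.foldl_cons]
    by_cases h1 : x ≤ 12
    · have hm : (PySem.Dict.mk [("criança", c), ("adolescente", a), ("adulto", ad),
          ("idoso", i)]).modify "criança" [] (· ++ [x])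
        = PySem.Dict.mk [("criança", c ++ [x]), ("adolescente", a), ("adulto", ad), ("idoso", i)] := by
        simp [PySem.Dict.modify, PySem.Dict.insert, PySem.Dict.getD, PySem.Dict.get?, PySem.Dict.contains]
      rw [if_pos h1, hm, ih]
      have n2 : ¬ (13 ≤ x ∧ x ≤ 17) := by omega
      have n3 : ¬ (17 < x ∧ x ≤ 64) := by omega
      simp [h1, n2, n3, List.append_assoc]
    · by_cases h2 : 13 ≤ x ∧ x ≤ 17
      · have hm : (PySem.Dict.mk [("criança", c), ("adolescente", a), ("adulto", ad),
            ("idoso", i)]).modify "adolescente" [] (· ++ [x])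
          = PySem.Dict.mk [("criança", c), ("adolescente", a ++ [x]), ("adulto", ad), ("idoso", i)] := by
          simp [PySem.Dict.modify, PySem.Dict.insert, PySem.Dict.getD, PySem.Dict.get?, PySem.Dict.contains]
        rw [if_neg h1, if_pos h2, hm, ih]
        have n3 : ¬ (17 < x ∧ x ≤ 64) := by omega
        simp [h1, h2, n3, List.append_assoc]
      · by_cases h3 : 17 < x ∧ x ≤ 64
        · have hm : (PySem.Dict.mk [("criança", c), ("adolescente", a), ("adulto", ad),
              ("idoso", i)]).modify "adulto" [] (· ++ [x])
            = PySem.Dict.mk [("criança", c), ("adolescente", a), ("adulto", ad ++ [x]), ("idoso", i)] := by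
            simp [PySem.Dict.modify, PySem.Dict.insert, PySem.Dict.getD, PySem.Dict.get?, PySem.Dict.contains]
          rw [if_neg h1, if_neg h2, if_pos h3, hm, ih]
          simp [h1, h2, h3, List.append_assoc]
        · have hm : (PySem.Dict.mk [("criança", c), ("adolescente", a), ("adulto", ad),
              ("idoso", i)]).modify "idoso" [] (· ++ [x])
            = PySem.Dict.mk [("criança", c), ("adolescente", a), ("adulto", ad), ("idoso", i ++ [x])] := by
            simp [PySem.Dict.modify, PySem.Dict.insert, PySem.Dict.getD, PySem.Dict.get?, PySem.Dict.contains]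
          rw [if_neg h1, if_neg h2, if_neg h3, hm, ih]
          have hA : 12 < x := by omega
          have hC : 17 < x := by omega
          have hD : 64 < x := by omega
          simp [hA, hC, hD, List.append_assoc]

-- On Int, A's adulto guard '17 < p' is B's '18 ≤ p'.
theorem filter_adulto_eq (xs : List Int) :
    xs.filter (fun p => decide (17 < p ∧ p ≤ 64)) = xs.filter (fun p => decide (18 ≤ p ∧ p ≤ 64)) := by
  apply List.filter_congr; intro p _; rw [decide_eq_decide]; omega

-- On Int, A's else-branch condition is B's '65 ≤ p'.
theorem filter_idoso_eq (xs : List Int) :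
    xs.filter (fun p => decide (¬ (p ≤ 12) ∧ ¬ (13 ≤ p ∧ p ≤ 17) ∧ ¬ (17 < p ∧ p ≤ 64)))
    = xs.filter (fun p => decide (65 ≤ p)) := by
  apply List.filter_congr; intro p _; rw [decide_eq_decide]; omega

-- ===== VERDICT (by name: the statement is the Claim_ definition above) =====
theorem processar_spec : Claim_equal_processar := by
  intro idades _
  show processar idades = processar_alt idades
  have he : processar idades = (idades.foldl (fun d pessoa =>
      if pessoa ≤ 12 then
        d.modify "criança" [] (· ++ [pessoa])
      else if 13 ≤ pessoa ∧ pessoa ≤ 17 then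
        d.modify "adolescente" [] (· ++ [pessoa])
      else if 17 < pessoa ∧ pessoa ≤ 64 then
        d.modify "adulto" [] (· ++ [pessoa])
      else
        d.modify "idoso" [] (· ++ [pessoa]))
      (PySem.Dict.ofList [("criança", []), ("adolescente", []), ("adulto", []), ("idoso", [])])).items := rfl
  have h0 : PySem.Dict.ofList [("criança", ([] : List Int)), ("adolescente", []), ("adulto", []), ("idoso", [])]
      = PySem.Dict.mk [("criança", []), ("adolescente", []), ("adulto", []), ("idoso", [])] := by decide
  rw [he, h0, processar_loop_inv, filter_adulto_eq, filter_idoso_eq]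
  rfl
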